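-- pv_equiv track=rewrite | github.com/weizhang25/OpenJudge | openjudge/graders/code/code_style.py | _check_indentation
-- ===== SOURCE A (Python) =====
-- def _check_indentation(code: str) -> tuple[bool, str]:
--     """Check indentation consistency"""
--     lines = code.split("\n")
--     indent_type = None  # 'spaces' or 'tabs'
--
--     for line in lines:
--         if line.strip():  # Non-empty line
--             leading = len(line) - len(line.lstrip())
--             if leading > 0:
--                 if line.startswith(" "):
--                     if indent_type is None:
--                         indent_type = "spaces"
--                     elif indent_type != "spaces":
--                         return (
--                             False,
--                             "Mixed indentation types (spaces and tabs)",
--                         )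
--                 elif line.startswith("\t"):
--                     if indent_type is None:
--                         indent_type = "tabs"
--                     elif indent_type != "tabs":
--                         return (
--                             False,
--                             "Mixed indentation types (spaces and tabs)",
--                         )
--
--     return True, "Consistent indentation"
-- ===== SOURCE B (Python) =====
-- def _check_indentation(code: str) -> tuple[bool, str]:
--     """Check indentation consistency"""
--     lines = code.split("\n")
--     has_space = any(
--         line.strip() and len(line) - len(line.lstrip()) > 0 and line.startswith(" ")
--         for line in lines
--     )
--     has_tab = any(
--         line.strip() and len(line) - len(line.lstrip()) > 0 and line.startswith("\t")
--         for line in lines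
--     )
--     if has_space and has_tab:
--         return (False, "Mixed indentation types (spaces and tabs)")
--     return (True, "Consistent indentation")
-- ===== Notes on version B (the rewrite author's own statement) =====
-- stated objective: simpler
-- what changed: Replaces the stateful first-wins indent_type variable with early return by two independently computed flags (any space-indented line, any tab-indented line) and a single decision at the end.
import Mathlib
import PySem

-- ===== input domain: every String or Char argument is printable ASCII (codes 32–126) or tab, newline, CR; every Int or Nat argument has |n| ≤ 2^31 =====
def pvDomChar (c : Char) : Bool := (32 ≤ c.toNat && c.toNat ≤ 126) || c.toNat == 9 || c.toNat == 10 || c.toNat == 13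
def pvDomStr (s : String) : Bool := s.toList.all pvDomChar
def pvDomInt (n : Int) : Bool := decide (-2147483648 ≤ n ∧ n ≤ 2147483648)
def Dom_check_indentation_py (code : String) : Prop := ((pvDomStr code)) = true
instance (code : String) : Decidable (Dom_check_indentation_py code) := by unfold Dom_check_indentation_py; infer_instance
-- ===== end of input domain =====

-- B is a simpler collect-then-decide decomposition of A's stateful early-return loop; same return value everywhere.

-- ===== PORT A =====
-- the for-loop with the mutable indent_type and the two early returns, as structural recursion on the lines
def checkIndentLoopA : List (List Char) → Option String → Bool × String
  | [], _ => (true, "Consistent indentation")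
  | l :: ls, st =>
    if PySem.Chars.strip l ≠ [] then
      if PySem.Chars.len l - PySem.Chars.len (PySem.Chars.lstrip l) > 0 then
        if PySem.Chars.startswith l " ".toList then
          match st with
          | none => checkIndentLoopA ls (some "spaces")
          | some t =>
            if t ≠ "spaces" then (false, "Mixed indentation types (spaces and tabs)")
            else checkIndentLoopA ls st
        else if PySem.Chars.startswith l "\t".toList then
          match st with
          | none => checkIndentLoopA ls (some "tabs")
          | some t =>
            if t ≠ "tabs" then (false, "Mixed indentation types (spaces and tabs)")
            else checkIndentLoopA ls st
        else checkIndentLoopA ls st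
      else checkIndentLoopA ls st
    else checkIndentLoopA ls st

def check_indentation_py (code : String) : Bool × String :=
  checkIndentLoopA (PySem.Chars.splitOn code.toList "\n".toList) none

-- ===== PORT B =====
-- per-line predicates of Source B's two generator expressions
def spaceIndented (l : List Char) : Bool :=
  PySem.Chars.strip l ≠ [] && PySem.Chars.len l - PySem.Chars.len (PySem.Chars.lstrip l) > 0
    && PySem.Chars.startswith l " ".toList

def tabIndented (l : List Char) : Bool :=
  PySem.Chars.strip l ≠ [] && PySem.Chars.len l - PySem.Chars.len (PySem.Chars.lstrip l) > 0
    && PySem.Chars.startswith l "\t".toList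

def check_indentation_py_alt (code : String) : Bool × String :=
  let lines := PySem.Chars.splitOn code.toList "\n".toList
  if lines.any spaceIndented && lines.any tabIndented then
    (false, "Mixed indentation types (spaces and tabs)")
  else
    (true, "Consistent indentation")

-- ===== PRECONDITION & SPEC =====
def Spec_check_indentation_py (code : String) (out : Bool × String) : Prop := out = check_indentation_py_alt code
instance (code : String) (out : Bool × String) : Decidable (Spec_check_indentation_py code out) := by unfold Spec_check_indentation_py; infer_instance

-- ===== CLAIM (what is proved, stated in full; the proofs are below) =====
def Claim_equal_check_indentation_py : Prop := ∀ (code : String), Dom_check_indentation_py code → Spec_check_indentation_py code (check_indentation_py code)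

-- ===== LEMMAS AND PROOFS =====

-- a line cannot start with both a space and a tab
lemma not_space_and_tab (l : List Char) (h : PySem.Chars.startswith l [' '] = true) :
    PySem.Chars.startswith l ['\t'] = false := by
  by_contra hne
  have ht : PySem.Chars.startswith l "\t".toList = true := by
    cases hb : PySem.Chars.startswith l "\t".toList with
    | true => rfl
    | false => exact absurd hb hne
  rw [PySem.Chars.startswith_iff] at h ht
  rcases h with ⟨t1, h1⟩
  rcases ht with ⟨t2, h2⟩
  have : ([' '] ++ t1 : List Char) = ['\t'] ++ t2 := h1.trans h2.symm
  simp at this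

-- characterisation of A's loop for each reachable state
lemma checkIndentLoopA_spec (ls : List (List Char)) :
    checkIndentLoopA ls none =
      (if ls.any spaceIndented && ls.any tabIndented then
        (false, "Mixed indentation types (spaces and tabs)") else (true, "Consistent indentation"))
    ∧ checkIndentLoopA ls (some "spaces") =
      (if ls.any tabIndented then
        (false, "Mixed indentation types (spaces and tabs)") else (true, "Consistent indentation"))
    ∧ checkIndentLoopA ls (some "tabs") =
      (if ls.any spaceIndented then
        (false, "Mixed indentation types (spaces and tabs)") else (true, "Consistent indentation")) := by
  induction ls with
  | nil => simp [checkIndentLoopA]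
  | cons l ls ih =>
    obtain ⟨ih0, ihs, iht⟩ := ih
    by_cases h1 : PySem.Chars.strip l = []
    · simp [checkIndentLoopA, h1, spaceIndented, tabIndented, ih0, ihs, iht]
    · by_cases h2 : (PySem.Chars.lstrip l).length < l.length
      · by_cases h3 : PySem.Chars.startswith l [' '] = true
        · have h4 := not_space_and_tab l h3
          simp [checkIndentLoopA, h1, h2, h3, h4, spaceIndented, tabIndented, ihs]
        · by_cases h4 : PySem.Chars.startswith l ['\t'] = true
          · simp [checkIndentLoopA, h1, h2, h3, h4, spaceIndented, tabIndented, iht]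
          · simp [checkIndentLoopA, h1, h2, h3, h4, spaceIndented, tabIndented, ih0, ihs, iht]
      · simp [checkIndentLoopA, h1, h2, spaceIndented, tabIndented, ih0, ihs, iht]

-- ===== VERDICT (by name: the statement is the Claim_ definition above) =====
theorem check_indentation_py_spec : Claim_equal_check_indentation_py := by
  intro code _
  unfold Spec_check_indentation_py check_indentation_py check_indentation_py_alt
  exact (checkIndentLoopA_spec (PySem.Chars.splitOn code.toList "\n".toList)).1
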